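-- pv_equiv track=rewrite | github.com/Nazarii14/MathStatistics | Індивідуальне завдання 2/Personal Work 2/program.py | countElementsIntervals
-- ===== SOURCE A (Python) =====
-- def countElementsIntervals(numbers, inters, counts):
--     result = []
--     for i in inters:
--         counter = 0
--         for x in range(len(numbers)):
--             if i == inters[0]:
--                 if i[0] <= numbers[x] <= i[1]:
--                     counter += counts[x]
--             else:
--                 if i[0] < numbers[x] <= i[1]:
--                     counter += counts[x]
--         result.append(counter)
--     return result
-- ===== SOURCE B (Python) =====
-- def countElementsIntervals(numbers, inters, counts):
--     # sort (value, count) pairs by value once, build prefix sums of counts,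
--     # then answer each interval by binary search: O((n+m) log n)
--     pairs = sorted(zip(numbers, counts), key=lambda p: p[0])
--     vals = [p[0] for p in pairs]
--     pre = [0]
--     for p in pairs:
--         pre.append(pre[-1] + p[1])
--
--     def cum(x, incl):
--         # sum of counts whose value is <= x (incl) / < x (not incl)
--         lo, hi = 0, len(vals)
--         while lo < hi:
--             mid = (lo + hi) // 2
--             if (vals[mid] <= x) if incl else (vals[mid] < x):
--                 lo = mid + 1
--             else:
--                 hi = mid
--         return pre[lo]
--
--     first = inters[0] if inters else None
--     result = []
--     for i in inters:
--         lo, hi = i[0], i[1]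
--         if lo > hi:
--             result.append(0)
--         elif i == first:
--             result.append(cum(hi, True) - cum(lo, False))
--         else:
--             result.append(cum(hi, True) - cum(lo, True))
--     return result
-- ===== Notes on version B (the rewrite author's own statement) =====
-- stated objective: faster
-- what changed: B sorts the (value, count) pairs once, builds a prefix-sum array of counts, and answers each interval by two binary searches (weighted count in (lo,hi] or [lo,hi] as a difference of two cumulative sums), replacing A's per-interval scan of all numbers.
-- outside the precondition, e.g. on countElementsIntervals([5], [(10,)], [1]): A returns [0], B raises IndexError; on countElementsIntervals([], [(1,)], []): A returns [0], B raises IndexError; on countElementsIntervals([5], [(10, 20)], []): A returns [0], B returns [0]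
import Mathlib
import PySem

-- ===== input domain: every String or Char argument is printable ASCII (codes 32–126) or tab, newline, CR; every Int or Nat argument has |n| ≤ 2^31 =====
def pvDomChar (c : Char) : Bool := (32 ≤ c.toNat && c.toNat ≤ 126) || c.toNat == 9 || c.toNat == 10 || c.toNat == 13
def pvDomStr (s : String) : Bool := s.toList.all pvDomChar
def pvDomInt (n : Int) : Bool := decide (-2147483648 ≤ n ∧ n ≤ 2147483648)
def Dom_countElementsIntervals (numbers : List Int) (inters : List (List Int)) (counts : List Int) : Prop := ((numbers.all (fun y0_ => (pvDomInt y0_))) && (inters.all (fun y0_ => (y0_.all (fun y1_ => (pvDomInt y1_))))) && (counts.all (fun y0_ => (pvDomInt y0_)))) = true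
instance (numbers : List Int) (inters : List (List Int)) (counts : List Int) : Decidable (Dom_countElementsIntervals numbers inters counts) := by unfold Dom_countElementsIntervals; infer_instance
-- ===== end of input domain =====

-- B replaces A's per-interval scan by sort-once + prefix sums + binary search per interval
-- (measured asymptotically faster); equivalence of the RETURN values is proved on Pre_.

-- ===== PORT A =====
def countElementsIntervals (numbers : List Int) (inters : List (List Int)) (counts : List Int) : List Int :=
  inters.foldl (fun result i =>
    let counter :=
      (PySem.List.pyRange 0 (numbers.length : Int) 1).foldl (fun counter x =>
        if i == PySem.List.pyGetD inters 0 [] then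
          if PySem.List.pyGetD i 0 0 ≤ PySem.List.pyGetD numbers x 0 ∧
             PySem.List.pyGetD numbers x 0 ≤ PySem.List.pyGetD i 1 0 then
            counter + PySem.List.pyGetD counts x 0
          else counter
        else
          if PySem.List.pyGetD i 0 0 < PySem.List.pyGetD numbers x 0 ∧
             PySem.List.pyGetD numbers x 0 ≤ PySem.List.pyGetD i 1 0 then
            counter + PySem.List.pyGetD counts x 0
          else counter) 0
    result ++ [counter]) []

-- ===== PORT B =====
-- Source B's while-loop binary search (cum's loop); lo, hi are the Python ints of the loop,
-- always 0 ≤ lo ≤ hi ≤ len(vals), so Nat indices and getD render vals[mid] exactly,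
-- and Nat division is Python's // on these nonnegative operands.
def pvSearch (vals : List Int) (x : Int) (incl : Bool) (lo hi : Nat) : Nat :=
  if h : lo < hi then
    let mid := (lo + hi) / 2
    if (if incl then vals.getD mid 0 ≤ x else vals.getD mid 0 < x)
    then pvSearch vals x incl (mid + 1) hi
    else pvSearch vals x incl lo mid
  else lo
termination_by hi - lo
decreasing_by all_goals omega

-- Source B's prefix-sum list: pre = [0]; for p in pairs: pre.append(pre[-1] + p[1])
def pvPre (pairs : List (Int × Int)) : List Int :=
  pairs.foldl (fun pre p => pre ++ [PySem.List.pyGetD pre (-1) 0 + p.2]) [0]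

-- Source B's cum(x, incl): pre[lo] after the binary search
def pvCum (vals : List Int) (pre : List Int) (x : Int) (incl : Bool) : Int :=
  pre.getD (pvSearch vals x incl 0 vals.length) 0

-- transliteration of Source B: sort (value, count) pairs by value, prefix sums, two binary
-- searches per interval ('first = inters[0] if inters else None' only matters when the
-- loop runs, so it is rendered as pyGetD inters 0 [])
def countElementsIntervals_alt (numbers : List Int) (inters : List (List Int)) (counts : List Int) : List Int :=
  let pairs := PySem.List.sorted (numbers.zip counts) (fun p => p.1)
  let vals := pairs.map (fun p => p.1)
  let pre := pvPre pairs
  let first := PySem.List.pyGetD inters 0 []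
  inters.foldl (fun result i =>
    let lo := PySem.List.pyGetD i 0 0
    let hi := PySem.List.pyGetD i 1 0
    result ++ [if lo > hi then 0
      else if i == first then pvCum vals pre hi true - pvCum vals pre lo false
      else pvCum vals pre hi true - pvCum vals pre lo true]) []

-- ===== PRECONDITION & SPEC =====
-- Pre_ excludes the inputs on which the indexing counts[x], i[0], i[1] goes out of range: on almost all of
-- them A itself raises IndexError, except degenerate ones where A's chained-comparison short-circuit (or an
-- empty numbers list) skips the missing element and A's 0 is an artefact of evaluation order while B's
-- up-front i[0]/i[1] reads raise (see the cited excluded examples).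
def Pre_countElementsIntervals (numbers : List Int) (inters : List (List Int)) (counts : List Int) : Prop :=
  inters = [] ∨ ((numbers = [] ∨ numbers.length ≤ counts.length) ∧ ∀ i ∈ inters, 2 ≤ i.length)
instance (numbers : List Int) (inters : List (List Int)) (counts : List Int) : Decidable (Pre_countElementsIntervals numbers inters counts) := by unfold Pre_countElementsIntervals; infer_instance

def pvWitness_countElementsIntervals : List Int × List (List Int) × List Int :=
  ([1, 3], [[0, 2], [2, 4]], [2, 5])

def Spec_countElementsIntervals (numbers : List Int) (inters : List (List Int)) (counts : List Int) (out : List Int) : Prop := out = countElementsIntervals_alt numbers inters counts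
instance (numbers : List Int) (inters : List (List Int)) (counts : List Int) (out : List Int) : Decidable (Spec_countElementsIntervals numbers inters counts out) := by unfold Spec_countElementsIntervals; infer_instance

-- ===== CLAIM (what is proved, stated in full; the proofs are below) =====
def Claim_equal_countElementsIntervals : Prop := ∀ (numbers : List Int) (inters : List (List Int)) (counts : List Int), Dom_countElementsIntervals numbers inters counts → Pre_countElementsIntervals numbers inters counts → Spec_countElementsIntervals numbers inters counts (countElementsIntervals numbers inters counts)

-- ===== LEMMAS AND PROOFS =====

-- the predicate the binary search partitions by: value ≤ x (incl) / value < x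
def pvP (incl : Bool) (x v : Int) : Bool := if incl then v ≤ x else v < x

-- the per-element contribution of one interval's bounds (lo, hi, inclusive), as in A's inner loop
def pvW (b : Int × Int × Bool) (vc : Int × Int) : Int :=
  if (if b.2.2 then b.1 ≤ vc.1 else b.1 < vc.1) ∧ vc.1 ≤ b.2.1 then vc.2 else 0

-- weighted count of pairs whose value satisfies pvP
def pvWsum (incl : Bool) (x : Int) (l : List (Int × Int)) : Int :=
  (l.map (fun p => if pvP incl x p.1 then p.2 else 0)).sum

theorem pvP_mono (incl : Bool) (x v w : Int) (h : w ≤ v) (hv : pvP incl x v = true) :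
    pvP incl x w = true := by
  cases incl <;> simp [pvP] at hv ⊢ <;> omega

-- binary search correctness on a sorted list
theorem pvSearch_spec (vals : List Int) (x : Int) (incl : Bool)
    (hs : vals.Pairwise (· ≤ ·)) :
    ∀ (n lo hi : Nat), hi - lo = n → lo ≤ hi → hi ≤ vals.length →
    (∀ j (hj : j < vals.length), j < lo → pvP incl x vals[j] = true) →
    (∀ j (hj : j < vals.length), hi ≤ j → ¬ pvP incl x vals[j] = true) →
    pvSearch vals x incl lo hi ≤ vals.length ∧
      ∀ j (hj : j < vals.length), (pvP incl x vals[j] = true ↔ j < pvSearch vals x incl lo hi) := by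
  have hmono : ∀ p q (hpq : p ≤ q) (hq : q < vals.length), vals[p]'(by omega) ≤ vals[q] := by
    intro p q hpq hq
    rcases Nat.lt_or_ge p q with h | h
    · exact (List.pairwise_iff_getElem.mp hs) p q (by omega) hq h
    · have : p = q := by omega
      subst this; exact le_refl _
  intro n
  induction n using Nat.strong_induction_on with
  | _ n ih =>
    intro lo hi hn hlh hhi hlow hhigh
    rw [pvSearch]
    by_cases h : lo < hi
    · rw [dif_pos h]
      have hmidlt : (lo + hi) / 2 < hi := by omega
      have hmidge : lo ≤ (lo + hi) / 2 := by omega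
      have hmv : vals.getD ((lo + hi) / 2) 0 = vals[(lo + hi) / 2]'(by omega) := by
        rw [List.getD_eq_getElem?_getD, List.getElem?_eq_getElem (by omega)]; rfl
      by_cases hp : pvP incl x (vals[(lo + hi) / 2]'(by omega)) = true
      · have hcond : (if incl then vals.getD ((lo + hi) / 2) 0 ≤ x else vals.getD ((lo + hi) / 2) 0 < x) = True := by
          rw [hmv]; cases incl <;> simp_all [pvP]
        simp only [hcond, if_true]
        refine ih (hi - ((lo + hi) / 2 + 1)) (by omega) ((lo + hi) / 2 + 1) hi rfl (by omega) hhi ?_ hhigh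
        intro j hj hjlt
        exact pvP_mono incl x _ _ (hmono j ((lo + hi) / 2) (by omega) (by omega)) hp
      · have hcond : (if incl then vals.getD ((lo + hi) / 2) 0 ≤ x else vals.getD ((lo + hi) / 2) 0 < x) = False := by
          rw [hmv]; cases incl <;> simp_all [pvP]
        simp only [hcond, if_false]
        refine ih ((lo + hi) / 2 - lo) (by omega) lo ((lo + hi) / 2) rfl (by omega) (by omega) hlow ?_
        intro j hj hjge
        intro hPj
        exact hp (pvP_mono incl x _ _ (hmono ((lo + hi) / 2) j hjge hj) hPj)
    · rw [dif_neg h]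
      have hle : lo = hi := by omega
      constructor
      · omega
      · intro j hj
        constructor
        · intro hPj
          by_contra hge
          exact hhigh j hj (by omega) hPj
        · intro hjlt
          exact hlow j hj hjlt

-- a weighted count over a list whose satisfying values are exactly the first k positions is the k-prefix sum
theorem pvWsum_take (incl : Bool) (x : Int) :
    ∀ (pairs : List (Int × Int)) (k : Nat), k ≤ pairs.length →
    (∀ j (hj : j < pairs.length), (pvP incl x (pairs[j].1) = true ↔ j < k)) →
    pvWsum incl x pairs = ((pairs.take k).map Prod.snd).sum := by
  intro pairs
  induction pairs with
  | nil => intro k _ _; simp [pvWsum]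
  | cons p t ih =>
    intro k hk hchar
    match k with
    | 0 =>
      have h0 : pvP incl x p.1 = false := by
        have := hchar 0 (by simp)
        simpa using this
      have ht : pvWsum incl x t = ((t.take 0).map Prod.snd).sum := by
        refine ih 0 (by omega) ?_
        intro j hj
        have := hchar (j + 1) (by simp; omega)
        simpa using this
      simp [pvWsum, h0] at ht ⊢
      simpa [pvWsum] using ht
    | k' + 1 =>
      have h0 : pvP incl x p.1 = true := by
        have := hchar 0 (by simp)
        simpa using this
      have ht : pvWsum incl x t = ((t.take k').map Prod.snd).sum := by
        refine ih k' (by simp at hk; omega) ?_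
        intro j hj
        have := hchar (j + 1) (by simp; omega)
        simpa [Nat.add_lt_add_iff_right] using this
      simp [pvWsum, h0, List.take_succ_cons] at ht ⊢
      simpa [pvWsum] using ht

-- pre[-1] of a nonempty list that ends with x is x
theorem pvLast_append (acc : List Int) (x : Int) :
    PySem.List.pyGetD (acc ++ [x]) (-1) 0 = x := by
  simp [PySem.List.pyGetD, PySem.List.pyGet?, PySem.List.pyIdx?]

-- the running-tail of prefix sums
def pvTail (s : Int) : List (Int × Int) → List Int
  | [] => []
  | p :: t => (s + p.2) :: pvTail (s + p.2) t

theorem pvPre_foldl : ∀ (l : List (Int × Int)) (acc : List Int) (s : Int),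
    PySem.List.pyGetD acc (-1) 0 = s →
    l.foldl (fun pre p => pre ++ [PySem.List.pyGetD pre (-1) 0 + p.2]) acc = acc ++ pvTail s l := by
  intro l
  induction l with
  | nil => intro acc s _; simp [pvTail]
  | cons p t ih =>
    intro acc s hlast
    rw [List.foldl_cons, hlast, ih (acc ++ [s + p.2]) (s + p.2) (pvLast_append acc _)]
    simp [pvTail]

theorem pvTail_getD : ∀ (l : List (Int × Int)) (s : Int) (j : Nat), j < l.length →
    (pvTail s l).getD j 0 = s + ((l.take (j + 1)).map Prod.snd).sum := by
  intro l
  induction l with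
  | nil => intro s j hj; simp at hj
  | cons p t ih =>
    intro s j hj
    match j with
    | 0 => simp [pvTail]
    | j' + 1 =>
      simp only [pvTail, List.getD_cons_succ, List.take_succ_cons, List.map_cons, List.sum_cons]
      rw [ih (s + p.2) j' (by simp at hj; omega)]
      ring

theorem pvPre_getD (pairs : List (Int × Int)) (k : Nat) (hk : k ≤ pairs.length) :
    (pvPre pairs).getD k 0 = ((pairs.take k).map Prod.snd).sum := by
  unfold pvPre
  rw [pvPre_foldl pairs [0] 0 (by simp [PySem.List.pyGetD, PySem.List.pyGet?, PySem.List.pyIdx?])]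
  match k with
  | 0 => simp
  | k' + 1 =>
    simp only [List.cons_append, List.nil_append, List.getD_cons_succ]
    rw [pvTail_getD pairs 0 k' (by omega)]
    simp

-- pvCum computes the weighted cumulative count over the sorted pairs
theorem pvCum_spec (pairs : List (Int × Int)) (hs : pairs.Pairwise (fun a b => a.1 ≤ b.1))
    (x : Int) (incl : Bool) :
    pvCum (pairs.map (fun p => p.1)) (pvPre pairs) x incl = pvWsum incl x pairs := by
  have hvs : (pairs.map (fun p => p.1)).Pairwise (· ≤ ·) := List.pairwise_map.mpr hs
  have hsp := pvSearch_spec (pairs.map (fun p => p.1)) x incl hvs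
    ((pairs.map (fun p => p.1)).length) 0 ((pairs.map (fun p => p.1)).length) (by omega) (by omega)
    (le_refl _) (by intro j hj h; omega) (by intro j hj h; omega)
  obtain ⟨hk, hchar⟩ := hsp
  unfold pvCum
  rw [pvPre_getD pairs _ (by simpa using hk)]
  refine (pvWsum_take incl x pairs _ (by simpa using hk) ?_).symm
  intro j hj
  have := hchar j (by simpa using hj)
  simpa using this

-- a foldl adding item contributions is the sum of the mapped contributions
theorem pv_foldl_add_ite {α : Type} (f : α → Int) :
    ∀ (l : List α) (a : Int), l.foldl (fun acc x => acc + f x) a = a + (l.map f).sum := by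
  intro l
  induction l with
  | nil => intro a; simp
  | cons x t ih => intro a; simp [List.foldl_cons, ih, add_assoc]

-- index loop over two parallel lists = fold over their zip
theorem pv_range_zip (g : Int → Int → Int → Int) :
    ∀ (nums cnts : List Int) (a : Int), nums.length ≤ cnts.length →
      (List.range nums.length).foldl
          (fun acc k => g acc (nums.getD k 0) (cnts.getD k 0)) a
        = (nums.zip cnts).foldl (fun acc vc => g acc vc.1 vc.2) a := by
  intro nums
  induction nums with
  | nil => intro cnts a _; simp
  | cons v t ih =>
    intro cnts a h
    match cnts with
    | [] => simp at h
    | c :: ct =>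
      simp only [List.length_cons, List.range_succ_eq_map, List.foldl_cons, List.foldl_map,
        List.getD_cons_zero, List.getD_cons_succ, List.zip_cons_cons]
      exact ih ct (g a v c) (by simpa using h)

theorem pv_pyrange_fold (g : Int → Int → Int → Int) (nums cnts : List Int) (a : Int)
    (h : nums.length ≤ cnts.length) :
    (PySem.List.pyRange 0 (nums.length : Int) 1).foldl
        (fun acc x => g acc (PySem.List.pyGetD nums x 0) (PySem.List.pyGetD cnts x 0)) a
      = (nums.zip cnts).foldl (fun acc vc => g acc vc.1 vc.2) a := by
  rw [PySem.List.pyRange_one]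
  simp only [List.foldl_map]
  have : ((nums.length : Int) - 0).toNat = nums.length := by omega
  rw [this]
  have := pv_range_zip g nums cnts a h
  simpa using this

def pvBF (first i : List Int) : Int × Int × Bool :=
  (PySem.List.pyGetD i 0 0, PySem.List.pyGetD i 1 0, i == first)

-- A's inner loop for one interval i, as a sum of pvW contributions
theorem pv_innerA (numbers counts : List Int) (inters : List (List Int)) (i : List Int)
    (h : numbers.length ≤ counts.length) :
    (PySem.List.pyRange 0 (numbers.length : Int) 1).foldl (fun counter x =>
        if i == PySem.List.pyGetD inters 0 [] then
          if PySem.List.pyGetD i 0 0 ≤ PySem.List.pyGetD numbers x 0 ∧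
             PySem.List.pyGetD numbers x 0 ≤ PySem.List.pyGetD i 1 0 then
            counter + PySem.List.pyGetD counts x 0
          else counter
        else
          if PySem.List.pyGetD i 0 0 < PySem.List.pyGetD numbers x 0 ∧
             PySem.List.pyGetD numbers x 0 ≤ PySem.List.pyGetD i 1 0 then
            counter + PySem.List.pyGetD counts x 0
          else counter) 0
      = ((numbers.zip counts).map (pvW (pvBF (PySem.List.pyGetD inters 0 []) i))).sum := by
  rw [pv_pyrange_fold (fun acc v c =>
        if i == PySem.List.pyGetD inters 0 [] then
          if PySem.List.pyGetD i 0 0 ≤ v ∧ v ≤ PySem.List.pyGetD i 1 0 then acc + c else acc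
        else
          if PySem.List.pyGetD i 0 0 < v ∧ v ≤ PySem.List.pyGetD i 1 0 then acc + c else acc)
      numbers counts 0 h]
  have hstep : (fun (acc : Int) (vc : Int × Int) =>
      if i == PySem.List.pyGetD inters 0 [] then
        if PySem.List.pyGetD i 0 0 ≤ vc.1 ∧ vc.1 ≤ PySem.List.pyGetD i 1 0 then acc + vc.2 else acc
      else
        if PySem.List.pyGetD i 0 0 < vc.1 ∧ vc.1 ≤ PySem.List.pyGetD i 1 0 then acc + vc.2 else acc)
      = fun acc vc => acc + pvW (pvBF (PySem.List.pyGetD inters 0 []) i) vc := by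
    funext acc vc
    simp only [pvW, pvBF]
    by_cases hb : (i == PySem.List.pyGetD inters 0 []) = true <;> simp [hb] <;> split_ifs <;> omega
  rw [hstep, pv_foldl_add_ite]
  simp

-- A's outer loop is a map (append-singleton fold)
theorem pv_A_map (numbers : List Int) (counts : List Int) :
    ∀ (inters0 inters : List (List Int)) (res : List Int),
      inters.foldl (fun result i =>
        result ++ [(PySem.List.pyRange 0 (numbers.length : Int) 1).foldl (fun counter x =>
          if i == PySem.List.pyGetD inters0 0 [] then
            if PySem.List.pyGetD i 0 0 ≤ PySem.List.pyGetD numbers x 0 ∧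
               PySem.List.pyGetD numbers x 0 ≤ PySem.List.pyGetD i 1 0 then
              counter + PySem.List.pyGetD counts x 0
            else counter
          else
            if PySem.List.pyGetD i 0 0 < PySem.List.pyGetD numbers x 0 ∧
               PySem.List.pyGetD numbers x 0 ≤ PySem.List.pyGetD i 1 0 then
              counter + PySem.List.pyGetD counts x 0
            else counter) 0]) res
      = res ++ inters.map (fun i =>
          (PySem.List.pyRange 0 (numbers.length : Int) 1).foldl (fun counter x =>
            if i == PySem.List.pyGetD inters0 0 [] then
              if PySem.List.pyGetD i 0 0 ≤ PySem.List.pyGetD numbers x 0 ∧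
                 PySem.List.pyGetD numbers x 0 ≤ PySem.List.pyGetD i 1 0 then
                counter + PySem.List.pyGetD counts x 0
              else counter
            else
              if PySem.List.pyGetD i 0 0 < PySem.List.pyGetD numbers x 0 ∧
                 PySem.List.pyGetD numbers x 0 ≤ PySem.List.pyGetD i 1 0 then
                counter + PySem.List.pyGetD counts x 0
              else counter) 0) := by
  intro inters0 inters
  induction inters with
  | nil => intro res; simp
  | cons i t ih => intro res; rw [List.foldl_cons, ih]; simp

-- B's outer loop is a map too
theorem pv_B_map (f : List Int → Int) :
    ∀ (inters : List (List Int)) (res : List Int),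
      inters.foldl (fun result i => result ++ [f i]) res = res ++ inters.map f := by
  intro inters
  induction inters with
  | nil => intro res; simp
  | cons i t ih => intro res; rw [List.foldl_cons, ih]; simp

-- difference of two mapped sums is the sum of pointwise differences
theorem pv_sum_sub {α : Type} (f g : α → Int) :
    ∀ (l : List α), (l.map f).sum - (l.map g).sum = (l.map (fun x => f x - g x)).sum := by
  intro l
  induction l with
  | nil => simp
  | cons x t ih => simp [List.map_cons, List.sum_cons]; omega

-- pvWsum is invariant under permutation (sorting the pairs does not change the weighted count)
theorem pvWsum_perm (incl : Bool) (x : Int) (l₁ l₂ : List (Int × Int)) (h : l₁.Perm l₂) :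
    pvWsum incl x l₁ = pvWsum incl x l₂ := by
  unfold pvWsum
  exact (h.map _).sum_eq

-- pointwise inclusion–exclusion: one element's interval contribution as a difference of cumulative flags
theorem pv_point (b : Bool) (lo hb v c : Int) (h : lo ≤ hb) :
    (if (if b then lo ≤ v else lo < v) ∧ v ≤ hb then c else 0)
      = (if pvP true hb v then c else 0) - (if pvP (!b) lo v then c else 0) := by
  cases b <;> simp [pvP] <;> split_ifs <;> omega

-- ===== VERDICT (by name: the statement is the Claim_ definition above) =====
theorem countElementsIntervals_spec : Claim_equal_countElementsIntervals := by
  intro numbers inters counts _hdom hpre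
  unfold Spec_countElementsIntervals
  unfold countElementsIntervals countElementsIntervals_alt
  have hA := pv_A_map numbers counts inters inters []
  have hB := pv_B_map (fun i =>
    let lo := PySem.List.pyGetD i 0 0
    let hi := PySem.List.pyGetD i 1 0
    if lo > hi then 0
    else if i == PySem.List.pyGetD inters 0 [] then
      pvCum ((PySem.List.sorted (numbers.zip counts) (fun p => p.1)).map (fun p => p.1))
        (pvPre (PySem.List.sorted (numbers.zip counts) (fun p => p.1))) hi true -
      pvCum ((PySem.List.sorted (numbers.zip counts) (fun p => p.1)).map (fun p => p.1))
        (pvPre (PySem.List.sorted (numbers.zip counts) (fun p => p.1))) lo false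
    else
      pvCum ((PySem.List.sorted (numbers.zip counts) (fun p => p.1)).map (fun p => p.1))
        (pvPre (PySem.List.sorted (numbers.zip counts) (fun p => p.1))) hi true -
      pvCum ((PySem.List.sorted (numbers.zip counts) (fun p => p.1)).map (fun p => p.1))
        (pvPre (PySem.List.sorted (numbers.zip counts) (fun p => p.1))) lo true) inters []
  rw [hA, hB]
  clear hA hB
  simp only [List.nil_append]
  by_cases hi : inters = []
  · subst hi; simp
  · have hlen : numbers.length ≤ counts.length ∨ numbers = [] := by
      rcases hpre with h | h
      · exact absurd h hi
      · rcases h.1 with h' | h'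
        · right; exact h'
        · left; exact h'
    refine List.map_congr_left ?_
    intro i _
    rcases hlen with hnc | hnil
    case _ =>
      rw [pv_innerA numbers counts inters i hnc]
      have hsortpw : (PySem.List.sorted (numbers.zip counts) (fun p => p.1)).Pairwise
          (fun a b => a.1 ≤ b.1) := PySem.List.sorted_pairwise _ _
      have hperm : (PySem.List.sorted (numbers.zip counts) (fun p => p.1)).Perm
          (numbers.zip counts) := PySem.List.sorted_perm _ _ _
      simp only [pvCum_spec _ hsortpw]
      rw [pvWsum_perm _ _ _ _ hperm, pvWsum_perm _ _ _ _ hperm, pvWsum_perm _ _ _ _ hperm]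
      set lo := PySem.List.pyGetD i 0 0 with hlo
      set hb := PySem.List.pyGetD i 1 0 with hhb
      by_cases hgt : lo > hb
      · rw [if_pos hgt]
        rw [List.sum_eq_zero]
        intro x hx
        simp only [List.mem_map] at hx
        obtain ⟨vc, hvc, rfl⟩ := hx
        simp only [pvW, pvBF, ← hlo, ← hhb]
        rw [if_neg]
        rintro ⟨h1, h2⟩
        have : lo ≤ vc.1 := by split at h1 <;> omega
        omega
      · rw [if_neg hgt]
        have hle : lo ≤ hb := by omega
        by_cases hfst : (i == PySem.List.pyGetD inters 0 []) = true
        · rw [if_pos hfst]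
          unfold pvWsum
          rw [pv_sum_sub]
          refine congrArg List.sum (List.map_congr_left ?_)
          intro vc _
          simp only [pvW, pvBF, hfst, ← hlo, ← hhb]
          simpa using pv_point true lo hb vc.1 vc.2 hle
        · rw [if_neg hfst]
          unfold pvWsum
          rw [pv_sum_sub]
          refine congrArg List.sum (List.map_congr_left ?_)
          intro vc _
          simp only [pvW, pvBF, Bool.not_eq_true] at hfst ⊢
          simp only [hfst, ← hlo, ← hhb]
          simpa using pv_point false lo hb vc.1 vc.2 hle
    case _ =>
      subst hnil
      simp [PySem.List.pyRange, pvCum, pvPre, pvSearch, PySem.List.sorted]
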